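-- pv_equiv track=rewrite | github.com/majestyai9/ghostwriter-ai | narrative_consistency.py | _is_time_inconsistent
-- ===== SOURCE A (Python) =====
-- def _is_time_inconsistent(prev_time: str, curr_time: str) -> bool:
--     """Check if two time markers are potentially inconsistent."""
--     # Simple heuristic: check if going backwards in time
--     day_order = ['Monday', 'Tuesday', 'Wednesday', 'Thursday', 'Friday', 'Saturday', 'Sunday']
--     time_order = ['dawn', 'morning', 'afternoon', 'evening', 'dusk', 'night', 'midnight']
--
--     prev_lower = prev_time.lower()
--     curr_lower = curr_time.lower()
--
--     # Check day progression
--     for i, day in enumerate(day_order):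
--         if day.lower() in prev_lower:
--             for j, next_day in enumerate(day_order):
--                 if next_day.lower() in curr_lower and j < i:
--                     return True
--
--     # Check time of day progression
--     for i, time in enumerate(time_order):
--         if time in prev_lower:
--             for j, next_time in enumerate(time_order):
--                 if next_time in curr_lower and j < i:
--                     # Only inconsistent if no day change indicated
--                     if 'next' not in curr_lower and 'following' not in curr_lower:
--                         return True
--
--     return False
-- ===== SOURCE B (Python) =====
-- def _scan_backwards(markers, prev_text, curr_text, lower):
--     """Single left-to-right pass with a 'seen in curr' flag: report True when a
--     marker matching prev_text appears strictly after one matching curr_text."""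
--     seen_curr = False
--     for m in markers:
--         needle = m.lower() if lower else m
--         if seen_curr and needle in prev_text:
--             return True
--         if needle in curr_text:
--             seen_curr = True
--     return False
--
--
-- def _is_time_inconsistent(prev_time: str, curr_time: str) -> bool:
--     """Check if two time markers are potentially inconsistent."""
--     day_order = ['Monday', 'Tuesday', 'Wednesday', 'Thursday', 'Friday', 'Saturday', 'Sunday']
--     time_order = ['dawn', 'morning', 'afternoon', 'evening', 'dusk', 'night', 'midnight']
--
--     prev_lower = prev_time.lower()
--     curr_lower = curr_time.lower()
--
--     if _scan_backwards(day_order, prev_lower, curr_lower, lower=True):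
--         return True
--     if ('next' not in curr_lower and 'following' not in curr_lower
--             and _scan_backwards(time_order, prev_lower, curr_lower, lower=False)):
--         return True
--     return False
-- ===== Notes on version B (the rewrite author's own statement) =====
-- stated objective: alternative
-- what changed: Replaces A's nested index scans (for each prev-matching marker, rescan the whole list for an earlier curr-matching one) with a single left-to-right pass per marker list carrying a 'seen in curr' flag, reporting True when a prev match occurs strictly after a curr match; the constant day-change guard is hoisted out of the loop.
import Mathlib
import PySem

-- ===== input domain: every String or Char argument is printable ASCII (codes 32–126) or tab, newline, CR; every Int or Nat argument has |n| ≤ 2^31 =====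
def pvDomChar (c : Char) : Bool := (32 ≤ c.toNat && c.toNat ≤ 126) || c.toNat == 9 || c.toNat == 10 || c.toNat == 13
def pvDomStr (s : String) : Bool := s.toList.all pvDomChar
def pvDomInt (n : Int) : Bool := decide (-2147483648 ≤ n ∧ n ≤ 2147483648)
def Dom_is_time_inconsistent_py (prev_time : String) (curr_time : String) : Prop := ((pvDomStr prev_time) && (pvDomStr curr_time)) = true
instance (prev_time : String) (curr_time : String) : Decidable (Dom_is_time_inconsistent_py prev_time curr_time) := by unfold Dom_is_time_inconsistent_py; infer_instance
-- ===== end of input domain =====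

-- B is simpler: one left-to-right pass per marker list with a 'seen in curr' flag,
-- instead of A's nested index scans; the day-change guard is hoisted out of the loop.
-- Equivalence is exact (no Pre_).

-- ===== PORT A =====
def pvDayOrder : List String :=
  ["Monday", "Tuesday", "Wednesday", "Thursday", "Friday", "Saturday", "Sunday"]
def pvTimeOrder : List String :=
  ["dawn", "morning", "afternoon", "evening", "dusk", "night", "midnight"]

def is_time_inconsistent_py (prev_time : String) (curr_time : String) : Bool :=
  let prev_lower := PySem.Str.lower prev_time
  let curr_lower := PySem.Str.lower curr_time
  -- 'for i, day in …: if …: for j, next_day in …: if …: return True' = nested any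
  if (PySem.List.enumerate pvDayOrder).any (fun a =>
       PySem.Str.isIn (PySem.Str.lower a.2) prev_lower &&
       (PySem.List.enumerate pvDayOrder).any (fun b =>
         PySem.Str.isIn (PySem.Str.lower b.2) curr_lower && decide (b.1 < a.1))) then
    true
  else if (PySem.List.enumerate pvTimeOrder).any (fun a =>
       PySem.Str.isIn a.2 prev_lower &&
       (PySem.List.enumerate pvTimeOrder).any (fun b =>
         PySem.Str.isIn b.2 curr_lower && decide (b.1 < a.1) &&
         (!PySem.Str.isIn "next" curr_lower && !PySem.Str.isIn "following" curr_lower))) then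
    true
  else
    false

-- ===== PORT B =====
-- the 'for m in markers' loop of _scan_backwards, threading the 'seen_curr' flag
def pvScanBackwards (markers : List String) (prevText currText : String)
    (lower : Bool) (seenCurr : Bool) : Bool :=
  match markers with
  | [] => false
  | m :: rest =>
    let needle := if lower then PySem.Str.lower m else m
    if seenCurr && PySem.Str.isIn needle prevText then true
    else pvScanBackwards rest prevText currText lower (seenCurr || PySem.Str.isIn needle currText)

def is_time_inconsistent_py_alt (prev_time : String) (curr_time : String) : Bool :=
  let prev_lower := PySem.Str.lower prev_time
  let curr_lower := PySem.Str.lower curr_time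
  if pvScanBackwards pvDayOrder prev_lower curr_lower true false then
    true
  else if (!PySem.Str.isIn "next" curr_lower && !PySem.Str.isIn "following" curr_lower) &&
          pvScanBackwards pvTimeOrder prev_lower curr_lower false false then
    true
  else
    false

-- ===== PRECONDITION & SPEC =====
def Spec_is_time_inconsistent_py (prev_time : String) (curr_time : String) (out : Bool) : Prop := out = is_time_inconsistent_py_alt prev_time curr_time
instance (prev_time : String) (curr_time : String) (out : Bool) : Decidable (Spec_is_time_inconsistent_py prev_time curr_time out) := by unfold Spec_is_time_inconsistent_py; infer_instance

-- ===== CLAIM (what is proved, stated in full; the proofs are below) =====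
def Claim_equal_is_time_inconsistent_py : Prop := ∀ (prev_time : String) (curr_time : String), Dom_is_time_inconsistent_py prev_time curr_time → Spec_is_time_inconsistent_py prev_time curr_time (is_time_inconsistent_py prev_time curr_time)

-- ===== LEMMAS AND PROOFS =====

-- day block: the nested scan over the literal day list equals the single-pass scan
theorem pv_day_block (pl cl : String) :
    ((PySem.List.enumerate pvDayOrder).any (fun a =>
       PySem.Str.isIn (PySem.Str.lower a.2) pl &&
       (PySem.List.enumerate pvDayOrder).any (fun b =>
         PySem.Str.isIn (PySem.Str.lower b.2) cl && decide (b.1 < a.1)))) =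
    pvScanBackwards pvDayOrder pl cl true false := by
  simp only [pvDayOrder, PySem.List.enumerate_cons, PySem.List.enumerate_nil,
    List.any_cons, List.any_nil, pvScanBackwards, if_true]
  generalize PySem.Str.isIn (PySem.Str.lower "Monday") pl = a1
  generalize PySem.Str.isIn (PySem.Str.lower "Tuesday") pl = a2
  generalize PySem.Str.isIn (PySem.Str.lower "Wednesday") pl = a3
  generalize PySem.Str.isIn (PySem.Str.lower "Thursday") pl = a4
  generalize PySem.Str.isIn (PySem.Str.lower "Friday") pl = a5
  generalize PySem.Str.isIn (PySem.Str.lower "Saturday") pl = a6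
  generalize PySem.Str.isIn (PySem.Str.lower "Sunday") pl = a7
  generalize PySem.Str.isIn (PySem.Str.lower "Monday") cl = b1
  generalize PySem.Str.isIn (PySem.Str.lower "Tuesday") cl = b2
  generalize PySem.Str.isIn (PySem.Str.lower "Wednesday") cl = b3
  generalize PySem.Str.isIn (PySem.Str.lower "Thursday") cl = b4
  generalize PySem.Str.isIn (PySem.Str.lower "Friday") cl = b5
  generalize PySem.Str.isIn (PySem.Str.lower "Saturday") cl = b6
  generalize PySem.Str.isIn (PySem.Str.lower "Sunday") cl = b7
  revert a1 a2 a3 a4 a5 a6 a7 b1 b2 b3 b4 b5 b6 b7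
  decide

-- time block: with the constant day-change guard g, the nested scan equals g && single pass
theorem pv_time_block (pl cl : String) (g : Bool) :
    ((PySem.List.enumerate pvTimeOrder).any (fun a =>
       PySem.Str.isIn a.2 pl &&
       (PySem.List.enumerate pvTimeOrder).any (fun b =>
         PySem.Str.isIn b.2 cl && decide (b.1 < a.1) && g))) =
    (g && pvScanBackwards pvTimeOrder pl cl false false) := by
  simp only [pvTimeOrder, PySem.List.enumerate_cons, PySem.List.enumerate_nil,
    List.any_cons, List.any_nil, pvScanBackwards, Bool.false_eq_true, if_false]
  generalize PySem.Str.isIn "dawn" pl = a1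
  generalize PySem.Str.isIn "morning" pl = a2
  generalize PySem.Str.isIn "afternoon" pl = a3
  generalize PySem.Str.isIn "evening" pl = a4
  generalize PySem.Str.isIn "dusk" pl = a5
  generalize PySem.Str.isIn "night" pl = a6
  generalize PySem.Str.isIn "midnight" pl = a7
  generalize PySem.Str.isIn "dawn" cl = b1
  generalize PySem.Str.isIn "morning" cl = b2
  generalize PySem.Str.isIn "afternoon" cl = b3
  generalize PySem.Str.isIn "evening" cl = b4
  generalize PySem.Str.isIn "dusk" cl = b5
  generalize PySem.Str.isIn "night" cl = b6
  generalize PySem.Str.isIn "midnight" cl = b7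
  cases g <;> (revert a1 a2 a3 a4 a5 a6 a7 b1 b2 b3 b4 b5 b6 b7; decide)

-- ===== VERDICT (by name: the statement is the Claim_ definition above) =====
theorem is_time_inconsistent_py_spec : Claim_equal_is_time_inconsistent_py := by
  intro prev_time curr_time _
  unfold Spec_is_time_inconsistent_py
  simp only [is_time_inconsistent_py, is_time_inconsistent_py_alt, pv_day_block, pv_time_block]
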